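-- pv_equiv track=rewrite | github.com/RylandeFM/AoC2021 | Day15.py | increaseGrid
-- ===== SOURCE A (Python) =====
-- def increaseGrid(oldGrid):
--     newGrid = []
--     for i in range(5):
--         for line in oldGrid:
--             newLine = []
--             for j in range(5):
--                 newLine += [((i + j + n - 1) % 9) + 1 for n in line]
--             newGrid.append(newLine)
--     return newGrid
-- ===== SOURCE B (Python) =====
-- def bump(v, k):
--     return ((v - 1 + k) % 9) + 1
--
-- def increaseGrid(oldGrid):
--     wide = []
--     for line in oldGrid:
--         w = []
--         for j in range(5):
--             w += [bump(n, j) for n in line]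
--         wide.append(w)
--     out = []
--     for i in range(5):
--         for w in wide:
--             out.append([bump(n, i) for n in w])
--     return out
-- ===== Notes on version B (the rewrite author's own statement) =====
-- stated objective: alternative
-- what changed: Replaces A's single triple-nested construction (for each of the 25 (i,j) tile pairs recompute ((i+j+n-1)%9)+1 from the original cell) by a two-pass decomposition with a bump(v,k)=((v-1+k)%9)+1 helper: first build a horizontally 5-tiled 'wide' grid, then vertically tile it by bumping entire wide rows, relying on bump composing additively mod 9.
import Mathlib
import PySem

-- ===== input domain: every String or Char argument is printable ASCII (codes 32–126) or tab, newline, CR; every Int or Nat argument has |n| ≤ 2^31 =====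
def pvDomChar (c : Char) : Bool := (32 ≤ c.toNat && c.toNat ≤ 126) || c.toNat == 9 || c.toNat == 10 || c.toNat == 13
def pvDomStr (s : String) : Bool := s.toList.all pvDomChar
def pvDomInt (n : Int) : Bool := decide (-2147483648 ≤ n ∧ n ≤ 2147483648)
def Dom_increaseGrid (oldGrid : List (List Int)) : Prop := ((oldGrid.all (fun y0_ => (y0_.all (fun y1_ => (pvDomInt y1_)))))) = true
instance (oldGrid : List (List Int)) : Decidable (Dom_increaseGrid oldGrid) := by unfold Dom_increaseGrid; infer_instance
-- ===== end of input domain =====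

-- B replaces A's triple nested loop with a two-pass decomposition (horizontal
-- 5-tiling with bump(n,j), then vertical 5-tiling with bump(n,i)); same cost,
-- alternative structure.

-- ===== PORT A =====
def increaseGrid (oldGrid : List (List Int)) : List (List Int) :=
  (PySem.List.pyRange 0 5 1).foldl (fun newGrid i =>
    oldGrid.foldl (fun newGrid line =>
      newGrid ++ [(PySem.List.pyRange 0 5 1).foldl (fun newLine j =>
        newLine ++ line.map (fun n => ((i + j + n - 1) % 9) + 1)) []]) newGrid) []

-- ===== PORT B =====
def pvBump (v k : Int) : Int := ((v - 1 + k) % 9) + 1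

def pvWideLine (line : List Int) : List Int :=
  (PySem.List.pyRange 0 5 1).foldl (fun w j => w ++ line.map (fun n => pvBump n j)) []

def increaseGrid_alt (oldGrid : List (List Int)) : List (List Int) :=
  let wide := oldGrid.foldl (fun acc line => acc ++ [pvWideLine line]) []
  (PySem.List.pyRange 0 5 1).foldl (fun out i =>
    wide.foldl (fun out w => out ++ [w.map (fun n => pvBump n i)]) out) []

-- ===== PRECONDITION & SPEC =====
def Spec_increaseGrid (oldGrid : List (List Int)) (out : List (List Int)) : Prop := out = increaseGrid_alt oldGrid
instance (oldGrid : List (List Int)) (out : List (List Int)) : Decidable (Spec_increaseGrid oldGrid out) := by unfold Spec_increaseGrid; infer_instance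

-- ===== CLAIM (what is proved, stated in full; the proofs are below) =====
def Claim_equal_increaseGrid : Prop := ∀ (oldGrid : List (List Int)), Dom_increaseGrid oldGrid → Spec_increaseGrid oldGrid (increaseGrid oldGrid)

-- ===== LEMMAS AND PROOFS =====

-- bump composes additively mod 9
theorem pv_bump_comp (i j n : Int) : pvBump (pvBump n j) i = ((i + j + n - 1) % 9) + 1 := by
  unfold pvBump; omega

-- a fold that only appends equals acc ++ flatMap
theorem pv_foldl_flat {a b : Type} (f : a -> List b) (l : List a) (acc : List b) :
    l.foldl (fun s x => s ++ f x) acc = acc ++ l.flatMap f := by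
  induction l generalizing acc with
  | nil => simp
  | cons x xs ih => simp [List.foldl, ih]

-- a fold that appends singletons equals acc ++ map
theorem pv_foldl_append {a b : Type} (f : a -> b) (l : List a) (acc : List b) :
    l.foldl (fun s x => s ++ [f x]) acc = acc ++ l.map f := by
  induction l generalizing acc with
  | nil => simp
  | cons x xs ih => simp [List.foldl, ih]

theorem pv_foldl_ext {a b : Type} (F G : b -> a -> b) (l : List a) (s : b)
    (h : forall s x, F s x = G s x) : l.foldl F s = l.foldl G s := by
  induction l generalizing s with
  | nil => rfl
  | cons x xs ih => rw [List.foldl_cons, List.foldl_cons, h, ih]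

-- A's inner line for tile-row i equals B's bumped wide line
theorem pv_line_eq (i : Int) (line : List Int) :
    (PySem.List.pyRange 0 5 1).foldl (fun newLine j =>
        newLine ++ line.map (fun n => ((i + j + n - 1) % 9) + 1)) [] =
    (pvWideLine line).map (fun n => pvBump n i) := by
  unfold pvWideLine
  rw [pv_foldl_flat (fun j => line.map (fun n => ((i + j + n - 1) % 9) + 1)),
      pv_foldl_flat (fun j => line.map (fun n => pvBump n j))]
  simp only [List.nil_append, List.map_flatMap]
  apply List.flatMap_congr
  intro j _
  rw [List.map_map]
  apply List.map_congr_left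
  intro n _
  show _ = pvBump (pvBump n j) i
  rw [pv_bump_comp]

theorem increaseGrid_eq_alt (oldGrid : List (List Int)) :
    increaseGrid oldGrid = increaseGrid_alt oldGrid := by
  unfold increaseGrid increaseGrid_alt
  rw [pv_foldl_append pvWideLine oldGrid []]
  apply pv_foldl_ext
  intro s i
  rw [pv_foldl_append (fun line => (PySem.List.pyRange 0 5 1).foldl (fun newLine j =>
        newLine ++ line.map (fun n => ((i + j + n - 1) % 9) + 1)) []) oldGrid s]
  rw [List.nil_append,
      pv_foldl_append (fun w => w.map (fun n => pvBump n i)) (oldGrid.map pvWideLine) s,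
      List.map_map]
  congr 1
  apply List.map_congr_left
  intro line _
  exact pv_line_eq i line

-- ===== VERDICT (by name: the statement is the Claim_ definition above) =====
theorem increaseGrid_spec : Claim_equal_increaseGrid := by
  intro oldGrid _
  unfold Spec_increaseGrid
  exact increaseGrid_eq_alt oldGrid
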